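-- pv_equiv track=rewrite | github.com/taurinrobinson-wq/saoriverse-console | src/emotional_os/deploy/modules/ui_components/response_handler.py | _generate_recap_from_history
-- ===== SOURCE A (Python) =====
-- def _generate_recap_from_history(history: list) -> str:
--     """Generate a brief recap of what's emerged in conversation so far."""
--     user_messages = [msg for msg in history if msg.get("role") == "user"]
--
--     recap_parts = []
--     if len(user_messages) > 0:
--         if "work" in user_messages[0].get("content", "").lower():
--             recap_parts.append("work stress")
--         if any("avoid" in msg.get("content", "").lower() for msg in user_messages):
--             recap_parts.append("avoidance pattern")
--         if any("breath" in msg.get("content", "").lower() or "chest" in msg.get("content", "").lower()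
--                for msg in user_messages):
--             recap_parts.append("physical tension")
--
--     return ", ".join(recap_parts) if recap_parts else "what you shared"
-- ===== SOURCE B (Python) =====
-- def _generate_recap_from_history(history: list) -> str:
--     """Generate a brief recap of what's emerged in conversation so far."""
--     work = avoid = tension = False
--     first = True
--     for msg in history:
--         if msg.get("role") != "user":
--             continue
--         content = msg.get("content", "").lower()
--         if first and "work" in content:
--             work = True
--         first = False
--         avoid = avoid or "avoid" in content
--         tension = tension or "breath" in content or "chest" in content
--     parts = [label for flag, label in
--              ((work, "work stress"), (avoid, "avoidance pattern"), (tension, "physical tension"))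
--              if flag]
--     return ", ".join(parts) if parts else "what you shared"
-- ===== Notes on version B (the rewrite author's own statement) =====
-- stated objective: alternative
-- what changed: Replaces the build-a-filtered-list-then-three-separate-scans structure with one single pass over history maintaining three boolean flags (and a first-user-message marker), assembling the recap from the flags at the end.
import Mathlib
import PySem

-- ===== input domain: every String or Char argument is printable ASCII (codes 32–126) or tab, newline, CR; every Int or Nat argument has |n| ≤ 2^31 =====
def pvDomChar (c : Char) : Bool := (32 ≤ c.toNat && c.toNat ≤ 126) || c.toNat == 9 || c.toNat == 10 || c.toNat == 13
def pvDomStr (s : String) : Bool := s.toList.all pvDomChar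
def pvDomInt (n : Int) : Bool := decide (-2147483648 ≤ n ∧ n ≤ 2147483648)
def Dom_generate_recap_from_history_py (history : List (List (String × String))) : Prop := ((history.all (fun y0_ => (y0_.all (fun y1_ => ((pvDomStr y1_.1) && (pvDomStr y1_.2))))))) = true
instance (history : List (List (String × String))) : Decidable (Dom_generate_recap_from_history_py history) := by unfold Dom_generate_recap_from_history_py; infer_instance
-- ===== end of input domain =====

-- B replaces A's filtered-list + three separate scans with one single pass over
-- history maintaining three boolean flags; same O(n) cost, different traversal.


-- ===== PORT A =====
-- shared one-line predicates (both Pythons test exactly these conditions)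
def pvIsUser (msg : List (String × String)) : Bool :=
  PySem.Dict.get? (PySem.Dict.mk msg) "role" == some "user"
def pvContent (msg : List (String × String)) : String :=
  PySem.Str.lower (PySem.Dict.getD (PySem.Dict.mk msg) "content" "")
def pvWorkP (msg : List (String × String)) : Bool := PySem.Str.isIn "work" (pvContent msg)
def pvAvoidP (msg : List (String × String)) : Bool := PySem.Str.isIn "avoid" (pvContent msg)
def pvTensP (msg : List (String × String)) : Bool :=
  PySem.Str.isIn "breath" (pvContent msg) || PySem.Str.isIn "chest" (pvContent msg)

def generate_recap_from_history_py (history : List (List (String × String))) : String :=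
  let user_messages := history.filter pvIsUser
  let recap_parts : List String :=
    if user_messages.length > 0 then
      (if pvWorkP (PySem.List.pyGetD user_messages 0 []) then ["work stress"] else []) ++
      (if user_messages.any pvAvoidP then ["avoidance pattern"] else []) ++
      (if user_messages.any pvTensP then ["physical tension"] else [])
    else []
  if recap_parts.isEmpty then "what you shared" else PySem.Str.join ", " recap_parts

-- ===== PORT B =====
-- single pass: state = (work, avoid, tension, first-user-message-still-ahead)
def pvStep (st : Bool × Bool × Bool × Bool) (msg : List (String × String)) :
    Bool × Bool × Bool × Bool :=
  if pvIsUser msg then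
    (st.1 || (st.2.2.2 && pvWorkP msg),
     st.2.1 || pvAvoidP msg,
     st.2.2.1 || pvTensP msg,
     false)
  else st

def generate_recap_from_history_py_alt (history : List (List (String × String))) : String :=
  let st := history.foldl pvStep (false, false, false, true)
  let parts : List String :=
    (if st.1 then ["work stress"] else []) ++
    (if st.2.1 then ["avoidance pattern"] else []) ++
    (if st.2.2.1 then ["physical tension"] else [])
  if parts.isEmpty then "what you shared" else PySem.Str.join ", " parts

-- ===== PRECONDITION & SPEC =====
def Spec_generate_recap_from_history_py (history : List (List (String × String))) (out : String) : Prop := out = generate_recap_from_history_py_alt history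
instance (history : List (List (String × String))) (out : String) : Decidable (Spec_generate_recap_from_history_py history out) := by unfold Spec_generate_recap_from_history_py; infer_instance

-- ===== CLAIM (what is proved, stated in full; the proofs are below) =====
def Claim_equal_generate_recap_from_history_py : Prop := ∀ (history : List (List (String × String))), Dom_generate_recap_from_history_py history → Spec_generate_recap_from_history_py history (generate_recap_from_history_py history)

-- ===== LEMMAS AND PROOFS =====

def pvHeadWork (us : List (List (String × String))) : Bool :=
  match us with
  | [] => false
  | m :: _ => pvWorkP m

-- characterisation of B's fold in terms of A's filtered list
theorem pvFold_char (l : List (List (String × String))) (w a t f : Bool) :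
    l.foldl pvStep (w, a, t, f) =
      (w || (f && pvHeadWork (l.filter pvIsUser)),
       a || (l.filter pvIsUser).any pvAvoidP,
       t || (l.filter pvIsUser).any pvTensP,
       f && (l.filter pvIsUser).isEmpty) := by
  induction l generalizing w a t f with
  | nil => simp [pvHeadWork]
  | cons m rest ih =>
    by_cases hu : pvIsUser m = true
    · simp only [List.foldl_cons, pvStep, hu, if_pos, List.filter_cons_of_pos hu, ih,
        pvHeadWork, List.any_cons, List.isEmpty_cons]
      simp [Bool.or_assoc]
    · simp only [List.foldl_cons, pvStep, hu, if_neg, Bool.false_eq_true, not_false_iff,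
        List.filter_cons_of_neg (by simpa using hu)]
      exact ih w a t f

theorem generate_recap_from_history_py_eq (history : List (List (String × String))) :
    generate_recap_from_history_py history = generate_recap_from_history_py_alt history := by
  unfold generate_recap_from_history_py generate_recap_from_history_py_alt
  rw [pvFold_char]
  cases hus : history.filter pvIsUser with
  | nil => simp [pvHeadWork]
  | cons m rest =>
    simp [pvHeadWork, PySem.List.pyGetD_zero_cons]

-- ===== VERDICT (by name: the statement is the Claim_ definition above) =====
theorem generate_recap_from_history_py_spec : Claim_equal_generate_recap_from_history_py := by
  intro history _
  exact generate_recap_from_history_py_eq history
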